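-- pv_equiv track=rewrite | github.com/mcsrainbow/python-scripts | scripts/prometheus_remote_write.py | _cumulate
-- ===== SOURCE A (Python) =====
-- from typing import Dict, Tuple, Optional, List
--
-- def _cumulate(bks: List[int], n: int) -> List[int]:
--     """
--     Convert non-cumulative bucket counts to cumulative counts.
--
--     Prometheus histograms use cumulative buckets, where each bucket
--     contains the count of all observations <= its upper bound.
--
--     Args:
--         bks: Non-cumulative bucket counts
--         n: Number of finite buckets (excluding +Inf)
--
--     Returns:
--         List of cumulative counts including +Inf bucket
--     """
--     out = []
--     run = 0
--     for i in range(n):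
--         run += bks[i]
--         out.append(run)
--     out.append(run + bks[-1])  # +Inf bucket (equals total count)
--     return out
-- ===== SOURCE B (Python) =====
-- def _cumulate(bks, n):
--     out = [sum(bks[:i + 1]) for i in range(n)]
--     out.append((out[-1] if out else 0) + bks[-1])
--     return out
-- ===== Notes on version B (the rewrite author's own statement) =====
-- stated objective: simpler
-- what changed: B replaces A's single accumulating pass (mutable running sum appended per bucket) by re-summing a prefix slice for each position, sum(bks[:i+1]), then adds bks[-1] to the last cumulative value for the +Inf bucket.
import Mathlib
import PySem

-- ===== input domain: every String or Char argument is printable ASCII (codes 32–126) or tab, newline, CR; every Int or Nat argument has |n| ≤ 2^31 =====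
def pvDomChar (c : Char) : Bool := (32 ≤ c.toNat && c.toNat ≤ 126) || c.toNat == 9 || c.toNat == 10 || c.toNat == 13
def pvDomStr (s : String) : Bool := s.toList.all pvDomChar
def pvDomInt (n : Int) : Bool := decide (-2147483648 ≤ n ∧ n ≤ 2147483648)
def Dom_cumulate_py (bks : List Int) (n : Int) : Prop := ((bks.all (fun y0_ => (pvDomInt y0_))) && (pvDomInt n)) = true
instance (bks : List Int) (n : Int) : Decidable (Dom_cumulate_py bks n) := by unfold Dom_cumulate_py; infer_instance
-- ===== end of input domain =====

-- B computes each cumulative value by re-summing the prefix slice bks[:i+1] instead of keeping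
-- A's running accumulator; objective: simpler (shorter, no mutable state), same result.
-- ===== PORT A =====
def cumulate_py (bks : List Int) (n : Int) : List Int :=
  -- out = []; run = 0; for i in range(n): run += bks[i]; out.append(run)
  let st := (PySem.List.pyRange 0 n 1).foldl
    (fun (st : List Int × Int) i =>
      (st.1 ++ [st.2 + (PySem.List.pyGet? bks i).getD 0],
       st.2 + (PySem.List.pyGet? bks i).getD 0)) ([], 0)
  -- out.append(run + bks[-1])
  st.1 ++ [st.2 + (PySem.List.pyGet? bks (-1)).getD 0]

-- ===== PORT B =====
def cumulate_py_alt (bks : List Int) (n : Int) : List Int :=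
  -- out = [sum(bks[:i + 1]) for i in range(n)]
  let out := (PySem.List.pyRange 0 n 1).map
    (fun i => (PySem.List.slice bks none (some (i + 1))).sum)
  -- out.append((out[-1] if out else 0) + bks[-1])
  out ++ [(if out ≠ [] then (PySem.List.pyGet? out (-1)).getD 0 else 0)
            + (PySem.List.pyGet? bks (-1)).getD 0]

-- ===== PRECONDITION & SPEC =====
-- A raises IndexError when bks is empty (bks[-1]) or when n > len(bks) (bks[i] inside the loop);
-- exactly those inputs are excluded.
def Pre_cumulate_py (bks : List Int) (n : Int) : Prop := bks ≠ [] ∧ n ≤ (bks.length : Int)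
instance (bks : List Int) (n : Int) : Decidable (Pre_cumulate_py bks n) := by unfold Pre_cumulate_py; infer_instance
def pvWitness_cumulate_py : List Int × Int := ([3, 1, 4], 3)
def Spec_cumulate_py (bks : List Int) (n : Int) (out : List Int) : Prop := out = cumulate_py_alt bks n
instance (bks : List Int) (n : Int) (out : List Int) : Decidable (Spec_cumulate_py bks n out) := by unfold Spec_cumulate_py; infer_instance

-- ===== CLAIM (what is proved, stated in full; the proofs are below) =====
def Claim_equal_cumulate_py : Prop := ∀ (bks : List Int) (n : Int), Dom_cumulate_py bks n → Pre_cumulate_py bks n → Spec_cumulate_py bks n (cumulate_py bks n)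

-- ===== LEMMAS AND PROOFS =====

-- A's loop over range(m) builds the prefix-sum list, with run = sum of the first m elements.
theorem cumulate_fold_eq (bks : List Int) (m : Nat) (hm : m ≤ bks.length) :
    (List.range m).foldl
      (fun (st : List Int × Int) (k : Nat) =>
        (st.1 ++ [st.2 + (PySem.List.pyGet? bks (k : Int)).getD 0],
         st.2 + (PySem.List.pyGet? bks (k : Int)).getD 0)) ([], 0)
    = ((List.range m).map (fun k => (bks.take (k + 1)).sum), (bks.take m).sum) := by
  induction m with
  | zero => simp
  | succ m ih =>
    rw [List.range_succ, List.foldl_append, List.map_append, ih (by omega)]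
    have hlt : m < bks.length := by omega
    simp only [List.foldl_cons, List.foldl_nil, List.map_cons, List.map_nil,
      PySem.List.pyGet?_natCast, List.getElem?_eq_getElem hlt, Option.getD_some,
      List.take_add_one, List.sum_append, Prod.mk.injEq, List.append_cancel_left_eq]
    constructor <;> simp

-- The last element of the prefix-sum list over range m (m > 0) is the sum of the first m elements.
theorem prefix_map_getLast (bks : List Int) (m : Nat) (hm : 0 < m) :
    ((List.range m).map (fun k => (bks.take (k + 1)).sum)).getLast? = some ((bks.take m).sum) := by
  obtain ⟨m', rfl⟩ : ∃ m', m = m' + 1 := ⟨m - 1, by omega⟩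
  rw [List.range_succ, List.map_append]
  simp

-- ===== VERDICT (by name: the statement is the Claim_ definition above) =====
theorem cumulate_py_spec : Claim_equal_cumulate_py := by
  intro bks n _ hpre
  obtain ⟨hne, hle⟩ := hpre
  unfold Spec_cumulate_py cumulate_py cumulate_py_alt
  by_cases hn : 0 ≤ n
  · obtain ⟨m, rfl⟩ : ∃ m : Nat, n = (m : Int) := ⟨n.toNat, (Int.toNat_of_nonneg hn).symm⟩
    have hm : m ≤ bks.length := by exact_mod_cast hle
    have hmap : (List.range m).map
        (fun (k : Nat) => (PySem.List.slice bks none (some ((k : Int) + 1))).sum)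
        = (List.range m).map (fun k => (bks.take (k + 1)).sum) := by
      refine List.map_congr_left ?_
      intro k _
      show (PySem.List.slice bks none (some ((k : Int) + 1))).sum = (bks.take (k + 1)).sum
      have : ((k : Int) + 1) = ((k + 1 : Nat) : Int) := by push_cast; ring
      rw [this, PySem.List.slice_to_natCast]
    rw [PySem.List.pyRange_zero_natCast, List.foldl_map, cumulate_fold_eq bks m hm, List.map_map]
    simp only [Function.comp_def]
    rw [hmap]
    rcases Nat.eq_zero_or_pos m with h0 | hpos
    · subst h0; simp
    · have hne' : (List.range m).map (fun k => (bks.take (k + 1)).sum) ≠ [] := by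
        simp [List.map_eq_nil_iff, List.range_eq_nil]; omega
      rw [if_pos hne']
      simp only [PySem.List.pyGet?_neg_one]
      rw [prefix_map_getLast bks m hpos]
      simp
  · -- n < 0: range(n) is empty on both sides, out = [] in B
    have h1 : PySem.List.pyRange 0 n 1 = [] := PySem.List.pyRange_one_eq_nil (by omega)
    simp [h1]
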